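-- pv_equiv track=rewrite | github.com/shaunnorris/aoc2021 | day5/day5.py | expand_points_part2
-- ===== SOURCE A (Python) =====
-- def expand_points_part2(points_list):
--     """Part 2."""
--     expanded_points_part2 = []
--
--     for point_set in points_list:
--         startx = point_set[0]
--         starty = point_set[1]
--         endx = point_set[2]
--         endy = point_set[3]
--         if startx <= endx:
--             x = list(range(startx, endx+1))
--         elif startx > endx:
--             x = list(range(startx,endx-1,-1))
--         elif startx == endx:
--             x = [startx]
--
--         if starty <= endy:
--             y = list(range(starty, endy+1))
--         elif starty > endy:
--             y = list(range(starty,endy-1,-1))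
--         elif starty == endy:
--             y = [starty]
--
--         if len(y) == 1:
--             y = y * len(x)
--         if len(x) == 1:
--             x = x * len(y)
--         ziplist = list(zip(x, y))
--         for element in ziplist:
--             newpoint = str(element[0])+":"+str(element[1])
--             expanded_points_part2.append(newpoint)
--     return expanded_points_part2
-- ===== SOURCE B (Python) =====
-- def expand_points_part2(points_list):
--     """Part 2: compute each point arithmetically by index, one pass, no intermediate range/zip lists."""
--     out = []
--     for ps in points_list:
--         sx, sy, ex, ey = ps[0], ps[1], ps[2], ps[3]
--         dx = 1 if sx <= ex else -1
--         dy = 1 if sy <= ey else -1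
--         lx = abs(ex - sx) + 1
--         ly = abs(ey - sy) + 1
--         n = ly if lx == 1 else (lx if ly == 1 else min(lx, ly))
--         for i in range(n):
--             px = sx if lx == 1 else sx + i * dx
--             py = sy if ly == 1 else sy + i * dy
--             out.append(str(px) + ":" + str(py))
--     return out
-- ===== Notes on version B (the rewrite author's own statement) =====
-- stated objective: simpler
-- what changed: Replaces A's per-segment construction of x and y range lists, length-1 padding by list repetition and zip with a single arithmetic index loop that computes each coordinate directly from start, step and index.
import Mathlib
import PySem

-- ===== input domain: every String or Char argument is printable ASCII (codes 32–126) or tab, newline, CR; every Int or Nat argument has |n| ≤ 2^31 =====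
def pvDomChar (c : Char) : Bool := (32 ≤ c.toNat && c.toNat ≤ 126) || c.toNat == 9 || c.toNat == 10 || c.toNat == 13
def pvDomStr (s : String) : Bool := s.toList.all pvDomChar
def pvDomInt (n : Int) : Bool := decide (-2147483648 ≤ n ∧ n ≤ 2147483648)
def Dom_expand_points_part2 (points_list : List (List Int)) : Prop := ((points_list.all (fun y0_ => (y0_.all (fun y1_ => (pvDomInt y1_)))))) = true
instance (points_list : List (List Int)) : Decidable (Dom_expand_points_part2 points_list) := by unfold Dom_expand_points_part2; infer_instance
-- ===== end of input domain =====

-- B replaces A's range-list building, length-1 padding and zip by a single arithmetic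
-- index loop per segment (objective: simpler — one pass, no intermediate lists).

-- ===== PORT A =====
-- per-segment block of A's loop body ('y * len(x)' list repetition is ported by hand as
-- flatten of replicate, which is exact for Python's list * int with a nonnegative count)
def blockA (ps : List Int) : List String :=
  let startx := PySem.List.pyGetD ps 0 0
  let starty := PySem.List.pyGetD ps 1 0
  let endx := PySem.List.pyGetD ps 2 0
  let endy := PySem.List.pyGetD ps 3 0
  let x := if startx ≤ endx then PySem.List.pyRange startx (endx+1) 1
           else PySem.List.pyRange startx (endx-1) (-1)
  let y := if starty ≤ endy then PySem.List.pyRange starty (endy+1) 1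
           else PySem.List.pyRange starty (endy-1) (-1)
  let y := if y.length = 1 then (List.replicate x.length y).flatten else y
  let x := if x.length = 1 then (List.replicate y.length x).flatten else x
  (x.zip y).map (fun e => PySem.Int.toStr e.1 ++ ":" ++ PySem.Int.toStr e.2)

def expand_points_part2 (points_list : List (List Int)) : List String :=
  points_list.foldl (fun acc ps => acc ++ blockA ps) []

-- ===== PORT B =====
def blockB (ps : List Int) : List String :=
  let sx := PySem.List.pyGetD ps 0 0
  let sy := PySem.List.pyGetD ps 1 0
  let ex := PySem.List.pyGetD ps 2 0
  let ey := PySem.List.pyGetD ps 3 0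
  let dx : Int := if sx ≤ ex then 1 else -1
  let dy : Int := if sy ≤ ey then 1 else -1
  let lx := (ex - sx).natAbs + 1
  let ly := (ey - sy).natAbs + 1
  let n := if lx = 1 then ly else if ly = 1 then lx else min lx ly
  (List.range n).map (fun (i : Nat) =>
    let px := if lx = 1 then sx else sx + (i : Int) * dx
    let py := if ly = 1 then sy else sy + (i : Int) * dy
    PySem.Int.toStr px ++ ":" ++ PySem.Int.toStr py)

def expand_points_part2_alt (points_list : List (List Int)) : List String :=
  points_list.foldl (fun acc ps => acc ++ blockB ps) []

-- ===== PRECONDITION & SPEC =====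
-- A indexes point_set[0..3]: it raises IndexError on any inner list shorter than 4.
def Pre_expand_points_part2 (points_list : List (List Int)) : Prop :=
  ∀ ps ∈ points_list, 4 ≤ ps.length
instance (points_list : List (List Int)) : Decidable (Pre_expand_points_part2 points_list) := by
  unfold Pre_expand_points_part2; infer_instance

def pvWitness_expand_points_part2 : List (List Int) := [[1, 1, 3, 3], [9, 7, 7, 9], [5, 2, 5, 2]]

def Spec_expand_points_part2 (points_list : List (List Int)) (out : List String) : Prop := out = expand_points_part2_alt points_list
instance (points_list : List (List Int)) (out : List String) : Decidable (Spec_expand_points_part2 points_list out) := by unfold Spec_expand_points_part2; infer_instance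

-- ===== CLAIM (what is proved, stated in full; the proofs are below) =====
def Claim_equal_expand_points_part2 : Prop := ∀ (points_list : List (List Int)), Dom_expand_points_part2 points_list → Pre_expand_points_part2 points_list → Spec_expand_points_part2 points_list (expand_points_part2 points_list)

-- ===== LEMMAS AND PROOFS =====

-- A's range construction as a map over List.range
lemma x_as_map (s e : Int) :
    (if s ≤ e then PySem.List.pyRange s (e+1) 1 else PySem.List.pyRange s (e-1) (-1))
    = (List.range ((e - s).natAbs + 1)).map
        (fun k : Nat => s + (if s ≤ e then (1:Int) else -1) * (k : Int)) := by
  by_cases h : s ≤ e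
  · have h1 : s < e + 1 := by omega
    have : ((e - s).natAbs + 1) = (e + 1 - s + 1 - 1).toNat := by omega
    simp [PySem.List.pyRange, h, h1, this]
  · have h1 : e - 1 < s := by omega
    have h3 : (s - (e - 1) + - -1 - 1) / - -1 = s - e + 1 := by norm_num; omega
    have : ((e - s).natAbs + 1) = ((s - (e - 1) + - -1 - 1) / - -1).toNat := by
      rw [h3]; omega
    simp [PySem.List.pyRange, h, h1, this]

lemma flatten_replicate_singleton {α : Type} (n : Nat) (a : α) :
    (List.replicate n [a]).flatten = List.replicate n a := by
  induction n with
  | zero => rfl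
  | succ m ih => simp [List.replicate_succ, ih]

lemma replicate_as_map {α : Type} (n : Nat) (a : α) :
    List.replicate n a = (List.range n).map (fun _ => a) := by
  simp [List.map_const']

lemma zip_map_range {α β : Type} (f : Nat → α) (g : Nat → β) (m k : Nat) :
    ((List.range m).map f).zip ((List.range k).map g)
    = (List.range (min m k)).map (fun i => (f i, g i)) := by
  apply List.ext_getElem
  · simp
  · intro i h1 h2
    have hm : i < m := by simp at h1; omega
    have hk : i < k := by simp at h1; omega
    simp [List.getElem_zip]

lemma block_eq (ps : List Int) : blockA ps = blockB ps := by
  simp only [blockA, blockB]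
  generalize PySem.List.pyGetD ps 0 0 = sx
  generalize PySem.List.pyGetD ps 1 0 = sy
  generalize PySem.List.pyGetD ps 2 0 = ex
  generalize PySem.List.pyGetD ps 3 0 = ey
  rw [x_as_map sx ex, x_as_map sy ey]
  set lx := (ex - sx).natAbs + 1 with hlx
  set ly := (ey - sy).natAbs + 1 with hly
  set dx : Int := if sx ≤ ex then 1 else -1 with hdx
  set dy : Int := if sy ≤ ey then 1 else -1 with hdy
  simp only [List.length_map, List.length_range]
  by_cases hx1 : lx = 1 <;> by_cases hy1 : ly = 1
  · -- lx = 1, ly = 1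
    simp [hx1, hy1]
  · -- lx = 1, ly ≠ 1
    rw [if_neg hy1, if_pos hx1, hx1]
    simp only [List.range_one, List.map_cons, List.map_nil, List.length_map,
      List.length_range, flatten_replicate_singleton]
    rw [replicate_as_map, zip_map_range, List.map_map]
    simp only [min_self, hy1, if_true, if_false]
    apply List.map_congr_left
    intro i _
    simp [mul_comm]
  · -- lx ≠ 1, ly = 1
    rw [if_pos hy1, hy1, if_neg hx1]
    simp only [List.range_one, List.map_cons, List.map_nil,
      flatten_replicate_singleton]
    rw [replicate_as_map, zip_map_range, List.map_map]
    simp only [min_self, if_true, if_neg hx1]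
    apply List.map_congr_left
    intro i _
    simp [mul_comm]
  · -- lx ≠ 1, ly ≠ 1
    rw [if_neg hy1, if_neg hx1]
    rw [zip_map_range, List.map_map]
    simp only [if_neg hx1, if_neg hy1]
    apply List.map_congr_left
    intro i _
    simp [mul_comm]

lemma foldl_blocks_eq (l : List (List Int)) (acc : List String) :
    l.foldl (fun acc ps => acc ++ blockA ps) acc
    = l.foldl (fun acc ps => acc ++ blockB ps) acc := by
  have h : (fun (acc : List String) ps => acc ++ blockA ps)
      = (fun acc ps => acc ++ blockB ps) := by
    funext a ps; rw [block_eq]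
  rw [h]

-- ===== VERDICT (by name: the statement is the Claim_ definition above) =====
theorem expand_points_part2_spec : Claim_equal_expand_points_part2 := by
  intro pl _ _
  unfold Spec_expand_points_part2 expand_points_part2 expand_points_part2_alt
  exact foldl_blocks_eq pl []
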